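-- pv_equiv track=rewrite | github.com/EntySec/Pex | pex/string/__init__.py | mode_symbolic
-- ===== SOURCE A (Python) =====
-- def mode_symbolic(mode: int) -> str:
--     """ Return the symbolic form of file mode.
--
--     :param int mode: mode
--     :return str: symbolic form of file mode
--     """
--
--     perms = ''
--
--     for _ in range(3):
--         perms = ('x' if (mode & 0o1) == 0o1 else '-') + perms
--         perms = ('w' if (mode & 0o2) == 0o2 else '-') + perms
--         perms = ('r' if (mode & 0o4) == 0o4 else '-') + perms
--         mode >>= 3
--
--     return perms
-- ===== SOURCE B (Python) =====
-- _TABLE = ('---', '--x', '-w-', '-wx', 'r--', 'r-x', 'rw-', 'rwx')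
--
--
-- def mode_symbolic(mode: int) -> str:
--     """ Return the symbolic form of file mode.
--
--     :param int mode: mode
--     :return str: symbolic form of file mode
--     """
--
--     return _TABLE[(mode >> 6) & 7] + _TABLE[(mode >> 3) & 7] + _TABLE[mode & 7]
-- ===== Notes on version B (the rewrite author's own statement) =====
-- stated objective: simpler
-- what changed: Replaces the per-bit loop that tests masks and prepends one character at a time with a precomputed lookup table of symbolic triples indexed by each octal digit of the low nine bits, returning one concatenation of three table entries.
import Mathlib
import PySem

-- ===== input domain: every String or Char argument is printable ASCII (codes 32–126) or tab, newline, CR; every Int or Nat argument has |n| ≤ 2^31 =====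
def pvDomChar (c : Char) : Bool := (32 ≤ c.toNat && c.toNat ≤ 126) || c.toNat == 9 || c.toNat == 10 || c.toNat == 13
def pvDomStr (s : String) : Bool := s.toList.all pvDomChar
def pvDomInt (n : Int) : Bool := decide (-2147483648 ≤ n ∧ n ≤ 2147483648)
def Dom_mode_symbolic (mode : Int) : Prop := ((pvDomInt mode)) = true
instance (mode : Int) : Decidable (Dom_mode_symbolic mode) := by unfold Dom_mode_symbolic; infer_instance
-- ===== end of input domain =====

-- B replaces A's 3-iteration per-bit loop with an 8-entry octal-digit lookup table; objective: simpler.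

-- ===== PORT A =====
def mode_symbolic (mode : Int) : String :=
  ((List.range 3).foldl (fun (st : String × Int) _ =>
      let perms := (if PySem.Int.band st.2 1 = 1 then "x" else "-") ++ st.1
      let perms := (if PySem.Int.band st.2 2 = 2 then "w" else "-") ++ perms
      let perms := (if PySem.Int.band st.2 4 = 4 then "r" else "-") ++ perms
      (perms, st.2 >>> (3 : Nat))) ("", mode)).1

-- ===== PORT B =====
def pvTable : List String := ["---", "--x", "-w-", "-wx", "r--", "r-x", "rw-", "rwx"]

def mode_symbolic_alt (mode : Int) : String :=
  PySem.List.pyGetD pvTable (PySem.Int.band (mode >>> (6 : Nat)) 7) "" ++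
  PySem.List.pyGetD pvTable (PySem.Int.band (mode >>> (3 : Nat)) 7) "" ++
  PySem.List.pyGetD pvTable (PySem.Int.band mode 7) ""

-- ===== PRECONDITION & SPEC =====
def Spec_mode_symbolic (mode : Int) (out : String) : Prop := out = mode_symbolic_alt mode
instance (mode : Int) (out : String) : Decidable (Spec_mode_symbolic mode out) := by unfold Spec_mode_symbolic; infer_instance

-- ===== CLAIM (what is proved, stated in full; the proofs are below) =====
def Claim_equal_mode_symbolic : Prop := ∀ (mode : Int), Dom_mode_symbolic mode → Spec_mode_symbolic mode (mode_symbolic mode)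

-- ===== LEMMAS AND PROOFS =====

-- one rwx triple, as A computes it for the low three bits of m
def pvTri (m : Int) : String :=
  (if PySem.Int.band m 4 = 4 then "r" else "-") ++
  ((if PySem.Int.band m 2 = 2 then "w" else "-") ++
   (if PySem.Int.band m 1 = 1 then "x" else "-"))

theorem pv_and_bit (n i : Nat) : n &&& 2 ^ i = n / 2 ^ i % 2 * 2 ^ i := by
  rw [Nat.and_two_pow]
  rcases Nat.mod_two_eq_zero_or_one (n / 2 ^ i) with h | h <;>
    simp [Nat.testBit, Nat.shiftRight_eq_div_pow, h]

theorem pv_and_one (n : Nat) : n &&& 1 = n % 2 := Nat.and_two_pow_sub_one_eq_mod n 1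
theorem pv_and_two (n : Nat) : n &&& 2 = n % 4 - n % 2 := by
  have := pv_and_bit n 1; norm_num at this; omega
theorem pv_and_four (n : Nat) : n &&& 4 = n % 8 - n % 4 := by
  have := pv_and_bit n 2; norm_num at this; omega
theorem pv_and_seven (n : Nat) : n &&& 7 = n % 8 := Nat.and_two_pow_sub_one_eq_mod n 3

theorem pv_band_neg (m c : Int) (hm : ¬ 0 ≤ m) (hc : 0 ≤ c) :
    PySem.Int.band m c = ↑(c.toNat - (c.toNat &&& (-m - 1).toNat)) := by
  simp only [PySem.Int.band, if_neg hm, if_pos hc]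

theorem pv_band1 (m : Int) : PySem.Int.band m 1 = m % 2 := by
  by_cases hm : 0 ≤ m
  · rw [PySem.Int.band_of_nonneg hm (by norm_num), show (1 : Int).toNat = 1 from rfl,
      pv_and_one m.toNat]
    omega
  · rw [pv_band_neg m 1 hm (by norm_num), show (1 : Int).toNat = 1 from rfl, Nat.and_comm,
      pv_and_one]
    omega

theorem pv_band2 (m : Int) : PySem.Int.band m 2 = m % 4 - m % 2 := by
  by_cases hm : 0 ≤ m
  · rw [PySem.Int.band_of_nonneg hm (by norm_num), show (2 : Int).toNat = 2 from rfl,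
      pv_and_two m.toNat]
    omega
  · rw [pv_band_neg m 2 hm (by norm_num), show (2 : Int).toNat = 2 from rfl, Nat.and_comm,
      pv_and_two]
    omega

theorem pv_band4 (m : Int) : PySem.Int.band m 4 = m % 8 - m % 4 := by
  by_cases hm : 0 ≤ m
  · rw [PySem.Int.band_of_nonneg hm (by norm_num), show (4 : Int).toNat = 4 from rfl,
      pv_and_four m.toNat]
    omega
  · rw [pv_band_neg m 4 hm (by norm_num), show (4 : Int).toNat = 4 from rfl, Nat.and_comm,
      pv_and_four]
    omega

theorem pv_band7 (m : Int) : PySem.Int.band m 7 = m % 8 := by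
  by_cases hm : 0 ≤ m
  · rw [PySem.Int.band_of_nonneg hm (by norm_num), show (7 : Int).toNat = 7 from rfl,
      pv_and_seven m.toNat]
    omega
  · rw [pv_band_neg m 7 hm (by norm_num), show (7 : Int).toNat = 7 from rfl, Nat.and_comm,
      pv_and_seven]
    omega

-- the table lookup at (m & 7) is exactly A's rwx triple for m
theorem pv_tri_table (m : Int) :
    PySem.List.pyGetD pvTable (PySem.Int.band m 7) "" = pvTri m := by
  unfold pvTri
  rw [pv_band7, pv_band1, pv_band2, pv_band4]
  have h0 : (0 : Int) ≤ m % 8 := Int.emod_nonneg m (by norm_num)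
  have h8 : m % 8 < 8 := Int.emod_lt_of_pos m (by norm_num)
  have h2 : m % 2 = m % 8 % 2 := by omega
  have h4 : m % 4 = m % 8 % 4 := by omega
  rw [h2, h4]
  set r := m % 8 with hr
  clear_value r
  interval_cases r <;> decide

theorem pv_shift66 (m : Int) : m >>> (3 : Nat) >>> (3 : Nat) = m >>> (6 : Nat) :=
  (Int.shiftRight_add m 3 3).symm

theorem pv_A_eq (mode : Int) :
    mode_symbolic mode = pvTri (mode >>> (6 : Nat)) ++ (pvTri (mode >>> (3 : Nat)) ++ pvTri mode) := by
  unfold mode_symbolic pvTri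
  simp only [show List.range 3 = [0, 1, 2] from rfl, List.foldl, pv_shift66]
  simp [String.append_assoc]

theorem mode_symbolic_eq_alt (mode : Int) : mode_symbolic mode = mode_symbolic_alt mode := by
  rw [pv_A_eq]
  unfold mode_symbolic_alt
  rw [pv_tri_table, pv_tri_table, pv_tri_table, String.append_assoc]

-- ===== VERDICT (by name: the statement is the Claim_ definition above) =====
theorem mode_symbolic_spec : Claim_equal_mode_symbolic := by
  intro mode _
  unfold Spec_mode_symbolic
  exact mode_symbolic_eq_alt mode
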